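-- pv_equiv track=rewrite | github.com/augustawind/nomad | nomad/util.py | points_in_octagon
-- ===== SOURCE A (Python) =====
-- def points_in_octagon(side):
--     points = set()
--     size = side * 3
--     half_size = size // 2
--     half_side = side // 2
--     for y in range(-half_size - 1, half_size + 1):
--         x1 = -half_side - (side - abs(y))
--         x2 = half_side + (side - abs(y)) + 1
--         for x in range(x1, x2):
--             points.add((x, y))
--     return points
-- ===== SOURCE B (Python) =====
-- def points_in_octagon(side):
--     # The octagon's rows are exactly the Manhattan ball |x| + |y| <= c with
--     # c = side // 2 + side: scan a bounding box and keep the points inside.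
--     c = side // 2 + side
--     half_size = (side * 3) // 2
--     return {(x, y)
--             for y in range(-half_size - 1, half_size + 1)
--             for x in range(-c, c + 1)
--             if abs(x) + abs(y) <= c}
-- ===== Notes on version B (the rewrite author's own statement) =====
-- stated objective: alternative
-- what changed: B replaces A's per-row computed x-bounds with a bounding-box scan keeping exactly the points of the Manhattan ball of radius half a side plus a side, expressed as one set comprehension.
import Mathlib
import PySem

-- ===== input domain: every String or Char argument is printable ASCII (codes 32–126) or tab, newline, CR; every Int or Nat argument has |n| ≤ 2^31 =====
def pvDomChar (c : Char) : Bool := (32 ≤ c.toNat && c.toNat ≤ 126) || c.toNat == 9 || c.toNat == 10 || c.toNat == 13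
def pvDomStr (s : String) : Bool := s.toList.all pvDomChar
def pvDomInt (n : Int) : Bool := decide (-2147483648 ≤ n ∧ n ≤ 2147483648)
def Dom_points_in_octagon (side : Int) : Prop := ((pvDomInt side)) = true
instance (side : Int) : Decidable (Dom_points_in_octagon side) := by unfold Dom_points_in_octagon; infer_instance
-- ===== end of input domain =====

-- B replaces A's per-row computed x-bounds with a bounding-box scan filtered by the
-- Manhattan-ball membership predicate (one set comprehension); same cost.

-- ===== PORT A =====
def points_in_octagon (side : Int) : List (Int × Int) :=
  let size := side * 3
  let half_size := PySem.Int.floordiv size 2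
  let half_side := PySem.Int.floordiv side 2
  (PySem.List.pyRange (-half_size - 1) (half_size + 1) 1).foldl
    (fun points y =>
      let x1 := -half_side - (side - |y|)
      let x2 := half_side + (side - |y|) + 1
      (PySem.List.pyRange x1 x2 1).foldl (fun pts x => PySem.Set.add pts (x, y)) points)
    PySem.Set.empty

-- ===== PORT B =====
def points_in_octagon_alt (side : Int) : List (Int × Int) :=
  let c := PySem.Int.floordiv side 2 + side
  let half_size := PySem.Int.floordiv (side * 3) 2
  PySem.Set.ofList
    ((PySem.List.pyRange (-half_size - 1) (half_size + 1) 1).flatMap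
      (fun y =>
        ((PySem.List.pyRange (-c) (c + 1) 1).filter
            (fun x => decide (|x| + |y| ≤ c))).map (fun x => (x, y))))

-- ===== PRECONDITION & SPEC =====
def Spec_points_in_octagon (side : Int) (out : List (Int × Int)) : Prop := out = points_in_octagon_alt side
instance (side : Int) (out : List (Int × Int)) : Decidable (Spec_points_in_octagon side out) := by unfold Spec_points_in_octagon; infer_instance

-- ===== CLAIM (what is proved, stated in full; the proofs are below) =====
def Claim_equal_points_in_octagon : Prop := ∀ (side : Int), Dom_points_in_octagon side → Spec_points_in_octagon side (points_in_octagon side)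

-- ===== LEMMAS AND PROOFS =====

-- Filtering a step-1 range down to the interval [lo, hi] yields exactly the range lo..hi
-- (induction form, with the range length as the induction measure).
theorem pv_filter_pyRange_aux (hi : Int) :
    ∀ (n : Nat) (a lo : Int), a ≤ lo → hi + 1 ≤ a + n →
      (PySem.List.pyRange a (a + n) 1).filter (fun x => decide (lo ≤ x ∧ x ≤ hi))
        = PySem.List.pyRange lo (hi + 1) 1 := by
  intro n
  induction n with
  | zero =>
    intro a lo h1 h2
    simp only [Nat.cast_zero, add_zero]
    rw [PySem.List.pyRange_one a a, PySem.List.pyRange_one lo (hi + 1)]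
    have h' : (hi + 1 - lo).toNat = 0 := by omega
    simp [h']
  | succ n ih =>
    intro a lo h1 h2
    rw [PySem.List.pyRange_one_cons (by omega : a < a + (↑(n + 1) : Int))]
    have harith : a + (↑(n + 1) : Int) = (a + 1) + (↑n : Int) := by push_cast; ring
    by_cases hha : hi < a
    · -- every element of the range exceeds hi: the filter is empty, and so is the target
      rw [List.filter_cons]
      have : (decide (lo ≤ a ∧ a ≤ hi)) = false := by simp; omega
      rw [this, if_neg Bool.false_ne_true]
      have hnil : (PySem.List.pyRange (a + 1) (a + (↑(n + 1) : Int)) 1).filter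
          (fun x => decide (lo ≤ x ∧ x ≤ hi)) = [] := by
        rw [List.filter_eq_nil_iff]
        intro x hx
        have := PySem.List.mem_pyRange_one.mp hx
        simp only [decide_eq_true_eq]
        omega
      rw [hnil, PySem.List.pyRange_one lo (hi + 1)]
      have : (hi + 1 - lo).toNat = 0 := by omega
      simp [this]
    · by_cases hla : lo ≤ a
      · -- head is kept (lo = a ≤ hi); the tail filters to the range a+1 .. hi
        have hlo : lo = a := by omega
        rw [List.filter_cons]
        have : (decide (lo ≤ a ∧ a ≤ hi)) = true := by simp; omega
        rw [this, if_pos rfl]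
        have hcong : (PySem.List.pyRange (a + 1) (a + (↑(n + 1) : Int)) 1).filter
              (fun x => decide (lo ≤ x ∧ x ≤ hi))
            = (PySem.List.pyRange (a + 1) (a + (↑(n + 1) : Int)) 1).filter
              (fun x => decide (a + 1 ≤ x ∧ x ≤ hi)) := by
          apply List.filter_congr
          intro x hx
          have := PySem.List.mem_pyRange_one.mp hx
          simp only [decide_eq_decide]
          omega
        rw [hcong, harith, ih (a + 1) (a + 1) (by omega) (by omega)]
        rw [hlo, PySem.List.pyRange_one_cons (by omega : a < hi + 1)]
      · -- head is dropped (a < lo); recurse on the tail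
        rw [List.filter_cons]
        have : (decide (lo ≤ a ∧ a ≤ hi)) = false := by simp; omega
        rw [this, if_neg Bool.false_ne_true, harith, ih (a + 1) lo (by omega) (by omega)]

-- Total form: the hypotheses only bracket [lo, hi] inside [a, b).
theorem pv_filter_pyRange (a b lo hi : Int) (h1 : a ≤ lo) (h2 : hi + 1 ≤ b) :
    (PySem.List.pyRange a b 1).filter (fun x => decide (lo ≤ x ∧ x ≤ hi))
      = PySem.List.pyRange lo (hi + 1) 1 := by
  by_cases hba : b ≤ a
  · rw [PySem.List.pyRange_one a b, PySem.List.pyRange_one lo (hi + 1)]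
    have hb : (b - a).toNat = 0 := by omega
    have hl : (hi + 1 - lo).toNat = 0 := by omega
    simp [hb, hl]
  · obtain ⟨n, hn⟩ : ∃ n : Nat, b = a + n := ⟨(b - a).toNat, by omega⟩
    subst hn
    exact pv_filter_pyRange_aux hi n a lo h1 h2

-- Per row y, B's filtered bounding-box scan is exactly A's range of x values.
theorem pv_row_eq (side y : Int) :
    ((PySem.List.pyRange (-(PySem.Int.floordiv side 2 + side))
        (PySem.Int.floordiv side 2 + side + 1) 1).filter
      (fun x => decide (|x| + |y| ≤ PySem.Int.floordiv side 2 + side)))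
      = PySem.List.pyRange (-(PySem.Int.floordiv side 2) - (side - |y|))
          (PySem.Int.floordiv side 2 + (side - |y|) + 1) 1 := by
  set c := PySem.Int.floordiv side 2 + side with hc
  have habs : 0 ≤ |y| := abs_nonneg y
  have hcong : ((PySem.List.pyRange (-c) (c + 1) 1).filter
        (fun x => decide (|x| + |y| ≤ c)))
      = ((PySem.List.pyRange (-c) (c + 1) 1).filter
        (fun x => decide (-c + |y| ≤ x ∧ x ≤ c - |y|))) := by
    apply List.filter_congr
    intro x _
    simp only [decide_eq_decide]
    rcases abs_cases x with ⟨h, _⟩ | ⟨h, _⟩ <;> rw [h] <;> omega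
  rw [hcong, pv_filter_pyRange (-c) (c + 1) (-c + |y|) (c - |y|) (by omega) (by omega)]
  have h1 : -c + |y| = -(PySem.Int.floordiv side 2) - (side - |y|) := by omega
  have h2 : c - |y| + 1 = PySem.Int.floordiv side 2 + (side - |y|) + 1 := by omega
  rw [h1, h2]

-- ===== VERDICT (by name: the statement is the Claim_ definition above) =====
theorem points_in_octagon_spec : Claim_equal_points_in_octagon := by
  intro side _
  unfold Spec_points_in_octagon points_in_octagon points_in_octagon_alt
  simp only [PySem.Set.ofList_eq_foldl, List.foldl_flatMap, List.foldl_map]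
  congr 1
  funext points y
  rw [pv_row_eq side y]
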